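-- pv_equiv track=rewrite | github.com/aev-suyana/peru_swan | scripts/aggregate_all_rules.py | calculate_cm_costs
-- ===== SOURCE A (Python) =====
-- def calculate_cm_costs(predicted_events, observed_events, N, W, min_days):
--     # FP: predicted=1, observed=0; TP: predicted=1, observed=1; FN: predicted=0, observed=1
--     fp_loss = 0
--     tp_loss = 0
--     fn_loss = 0
--     current_fp = current_tp = current_fn = 0
--     for i in range(len(predicted_events)):
--         p, o = predicted_events[i], observed_events[i]
--         # False Positive event
--         if p == 1 and o == 0:
--             current_fp += 1
--             if current_tp > 0:
--                 if current_tp >= min_days: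
--                     tp_loss += N * W * current_tp
--                 current_tp = 0
--             if current_fn > 0:
--                 if current_fn >= min_days:
--                     fn_loss += N * W * current_fn
--                 current_fn = 0
--         # True Positive event
--         elif p == 1 and o == 1:
--             current_tp += 1
--             if current_fp > 0:
--                 if current_fp >= min_days:
--                     fp_loss += N * W * current_fp
--                 current_fp = 0
--             if current_fn > 0:
--                 if current_fn >= min_days:
--                     fn_loss += N * W * current_fn
--                 current_fn = 0
--         # False Negative event
--         elif p == 0 and o == 1:
--             current_fn += 1
--             if current_fp > 0:
--                 if current_fp >= min_days:
--                     fp_loss += N * W * current_fp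
--                 current_fp = 0
--             if current_tp > 0:
--                 if current_tp >= min_days:
--                     tp_loss += N * W * current_tp
--                 current_tp = 0
--         else:
--             # End any ongoing events
--             if current_fp > 0:
--                 if current_fp >= min_days:
--                     fp_loss += N * W * current_fp
--                 current_fp = 0
--             if current_tp > 0:
--                 if current_tp >= min_days:
--                     tp_loss += N * W * current_tp
--                 current_tp = 0
--             if current_fn > 0:
--                 if current_fn >= min_days:
--                     fn_loss += N * W * current_fn
--                 current_fn = 0
--     # End of sequence: add any remaining events
--     if current_fp >= min_days:
--         fp_loss += N * W * current_fp
--     if current_tp >= min_days: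
--         tp_loss += N * W * current_tp
--     if current_fn >= min_days:
--         fn_loss += N * W * current_fn
--     return fp_loss, tp_loss, fn_loss
-- ===== SOURCE B (Python) =====
-- def calculate_cm_costs(predicted_events, observed_events, N, W, min_days):
--     # Classify each day, then charge maximal runs of equal labels.
--     tags = []
--     for i in range(len(predicted_events)):
--         p, o = predicted_events[i], observed_events[i]
--         if p == 1 and o == 0:
--             tags.append(0)          # FP day
--         elif p == 1 and o == 1:
--             tags.append(1)          # TP day
--         elif p == 0 and o == 1:
--             tags.append(2)          # FN day
--         else:
--             tags.append(3)          # no event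
--     fp_loss = tp_loss = fn_loss = 0
--     while tags:
--         head = tags[0]
--         run = 1
--         while run < len(tags) and tags[run] == head:
--             run += 1
--         if head == 0 and run >= min_days:
--             fp_loss += N * W * run
--         elif head == 1 and run >= min_days:
--             tp_loss += N * W * run
--         elif head == 2 and run >= min_days:
--             fn_loss += N * W * run
--         tags = tags[run:]
--     return fp_loss, tp_loss, fn_loss
-- ===== Notes on version B (the rewrite author's own statement) =====
-- stated objective: simpler
-- what changed: B replaces A's one-pass state machine with three cross-flushing run counters by a two-phase decomposition: classify each day into a FP/TP/FN/none label, then walk maximal runs of equal labels and charge N*W*length for each run of length >= min_days.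
import Mathlib
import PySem

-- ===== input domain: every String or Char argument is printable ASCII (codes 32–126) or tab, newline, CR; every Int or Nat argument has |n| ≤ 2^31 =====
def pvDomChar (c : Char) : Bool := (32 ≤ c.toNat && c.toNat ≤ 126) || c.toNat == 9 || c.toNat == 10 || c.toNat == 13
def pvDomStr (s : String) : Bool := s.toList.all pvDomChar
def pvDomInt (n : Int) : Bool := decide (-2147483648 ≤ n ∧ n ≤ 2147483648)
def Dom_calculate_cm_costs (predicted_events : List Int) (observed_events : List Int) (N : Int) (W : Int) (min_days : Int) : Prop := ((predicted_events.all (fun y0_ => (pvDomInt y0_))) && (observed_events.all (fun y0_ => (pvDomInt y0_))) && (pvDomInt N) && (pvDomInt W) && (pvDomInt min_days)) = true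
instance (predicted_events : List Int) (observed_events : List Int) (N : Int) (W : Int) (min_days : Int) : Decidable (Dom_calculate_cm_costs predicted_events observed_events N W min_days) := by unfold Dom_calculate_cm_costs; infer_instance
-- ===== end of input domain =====

-- B replaces A's three cross-flushing run counters by a two-phase decomposition (classify each
-- day into a label, then charge maximal runs of equal labels); objective: simpler.

-- ===== PORT A =====
-- one iteration of A's for-loop: state (fp_loss, tp_loss, fn_loss, current_fp, current_tp, current_fn)
def stepA (N W min_days : Int) (s : Int × Int × Int × Int × Int × Int) (p o : Int) :
    Int × Int × Int × Int × Int × Int :=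
  let (fp_loss, tp_loss, fn_loss, current_fp, current_tp, current_fn) := s
  if p == 1 && o == 0 then
    let current_fp := current_fp + 1
    let tp_loss := if current_tp > 0 && current_tp ≥ min_days then tp_loss + N * W * current_tp else tp_loss
    let current_tp := if current_tp > 0 then 0 else current_tp
    let fn_loss := if current_fn > 0 && current_fn ≥ min_days then fn_loss + N * W * current_fn else fn_loss
    let current_fn := if current_fn > 0 then 0 else current_fn
    (fp_loss, tp_loss, fn_loss, current_fp, current_tp, current_fn)
  else if p == 1 && o == 1 then
    let current_tp := current_tp + 1
    let fp_loss := if current_fp > 0 && current_fp ≥ min_days then fp_loss + N * W * current_fp else fp_loss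
    let current_fp := if current_fp > 0 then 0 else current_fp
    let fn_loss := if current_fn > 0 && current_fn ≥ min_days then fn_loss + N * W * current_fn else fn_loss
    let current_fn := if current_fn > 0 then 0 else current_fn
    (fp_loss, tp_loss, fn_loss, current_fp, current_tp, current_fn)
  else if p == 0 && o == 1 then
    let current_fn := current_fn + 1
    let fp_loss := if current_fp > 0 && current_fp ≥ min_days then fp_loss + N * W * current_fp else fp_loss
    let current_fp := if current_fp > 0 then 0 else current_fp
    let tp_loss := if current_tp > 0 && current_tp ≥ min_days then tp_loss + N * W * current_tp else tp_loss
    let current_tp := if current_tp > 0 then 0 else current_tp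
    (fp_loss, tp_loss, fn_loss, current_fp, current_tp, current_fn)
  else
    let fp_loss := if current_fp > 0 && current_fp ≥ min_days then fp_loss + N * W * current_fp else fp_loss
    let current_fp := if current_fp > 0 then 0 else current_fp
    let tp_loss := if current_tp > 0 && current_tp ≥ min_days then tp_loss + N * W * current_tp else tp_loss
    let current_tp := if current_tp > 0 then 0 else current_tp
    let fn_loss := if current_fn > 0 && current_fn ≥ min_days then fn_loss + N * W * current_fn else fn_loss
    let current_fn := if current_fn > 0 then 0 else current_fn
    (fp_loss, tp_loss, fn_loss, current_fp, current_tp, current_fn)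

def calculate_cm_costs (predicted_events : List Int) (observed_events : List Int) (N : Int) (W : Int) (min_days : Int) : Int × Int × Int :=
  let s := (PySem.List.pyRange 0 (predicted_events.length : Int) 1).foldl
    (fun s i => stepA N W min_days s (PySem.List.pyGetD predicted_events i 0) (PySem.List.pyGetD observed_events i 0))
    (0, 0, 0, 0, 0, 0)
  let (fp_loss, tp_loss, fn_loss, current_fp, current_tp, current_fn) := s
  let fp_loss := if current_fp ≥ min_days then fp_loss + N * W * current_fp else fp_loss
  let tp_loss := if current_tp ≥ min_days then tp_loss + N * W * current_tp else tp_loss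
  let fn_loss := if current_fn ≥ min_days then fn_loss + N * W * current_fn else fn_loss
  (fp_loss, tp_loss, fn_loss)

-- ===== PORT B =====
-- day classification (the if/elif chain building `tags` in Source B)
def tagOf (p o : Int) : Int :=
  if p == 1 && o == 0 then 0
  else if p == 1 && o == 1 then 1
  else if p == 0 && o == 1 then 2
  else 3

-- the inner while loop: number of leading elements of `rest` equal to `head`
def runLen (head : Int) : List Int → Nat
  | [] => 0
  | t :: rest => if t == head then runLen head rest + 1 else 0

-- the outer while loop: charge the first maximal run, continue on the remaining tags
def runScan (N W min_days : Int) : List Int → Int × Int × Int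
  | [] => (0, 0, 0)
  | h :: rest =>
    let run : Int := 1 + (runLen h rest : Int)
    let (fp_loss, tp_loss, fn_loss) := runScan N W min_days (rest.drop (runLen h rest))
    if h == 0 && run ≥ min_days then (fp_loss + N * W * run, tp_loss, fn_loss)
    else if h == 1 && run ≥ min_days then (fp_loss, tp_loss + N * W * run, fn_loss)
    else if h == 2 && run ≥ min_days then (fp_loss, tp_loss, fn_loss + N * W * run)
    else (fp_loss, tp_loss, fn_loss)
termination_by tags => tags.length
decreasing_by simp

def calculate_cm_costs_alt (predicted_events : List Int) (observed_events : List Int) (N : Int) (W : Int) (min_days : Int) : Int × Int × Int :=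
  let tags := (PySem.List.pyRange 0 (predicted_events.length : Int) 1).map
    (fun i => tagOf (PySem.List.pyGetD predicted_events i 0) (PySem.List.pyGetD observed_events i 0))
  runScan N W min_days tags

-- ===== PRECONDITION & SPEC =====
-- Pre_ excludes exactly the inputs where observed_events is shorter than predicted_events:
-- there Python A raises IndexError (and Source B raises the same IndexError).
def Pre_calculate_cm_costs (predicted_events : List Int) (observed_events : List Int) (N : Int) (W : Int) (min_days : Int) : Prop :=
  predicted_events.length ≤ observed_events.length
instance (predicted_events : List Int) (observed_events : List Int) (N : Int) (W : Int) (min_days : Int) : Decidable (Pre_calculate_cm_costs predicted_events observed_events N W min_days) := by unfold Pre_calculate_cm_costs; infer_instance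

def pvWitness_calculate_cm_costs : List Int × List Int × Int × Int × Int := ([1, 1, 0, 0, 1], [0, 1, 1, 0, 1], 2, 3, 1)

def Spec_calculate_cm_costs (predicted_events : List Int) (observed_events : List Int) (N : Int) (W : Int) (min_days : Int) (out : Int × Int × Int) : Prop := out = calculate_cm_costs_alt predicted_events observed_events N W min_days
instance (predicted_events : List Int) (observed_events : List Int) (N : Int) (W : Int) (min_days : Int) (out : Int × Int × Int) : Decidable (Spec_calculate_cm_costs predicted_events observed_events N W min_days out) := by unfold Spec_calculate_cm_costs; infer_instance

-- ===== CLAIM (what is proved, stated in full; the proofs are below) =====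
def Claim_equal_calculate_cm_costs : Prop := ∀ (predicted_events : List Int) (observed_events : List Int) (N : Int) (W : Int) (min_days : Int), Dom_calculate_cm_costs predicted_events observed_events N W min_days → Pre_calculate_cm_costs predicted_events observed_events N W min_days → Spec_calculate_cm_costs predicted_events observed_events N W min_days (calculate_cm_costs predicted_events observed_events N W min_days)

-- ===== LEMMAS AND PROOFS =====

-- abstract single-run state: only the counter of the current tag h can be nonzero
def absCnt (h k : Int) : Int × Int × Int :=
  (if h = 0 then k else 0, if h = 1 then k else 0, if h = 2 then k else 0)

def unit3 (h v : Int) : Int × Int × Int :=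
  if h = 0 then (v, 0, 0) else if h = 1 then (0, v, 0) else if h = 2 then (0, 0, v) else (0, 0, 0)

def add3 (x y : Int × Int × Int) : Int × Int × Int := (x.1 + y.1, x.2.1 + y.2.1, x.2.2 + y.2.2)

def mk6 (L C : Int × Int × Int) : Int × Int × Int × Int × Int × Int :=
  (L.1, L.2.1, L.2.2, C.1, C.2.1, C.2.2)

-- A's loop body as a function of the day's tag
def stepT (N W min_days : Int) (s : Int × Int × Int × Int × Int × Int) (t : Int) :
    Int × Int × Int × Int × Int × Int :=
  stepA N W min_days s (if t = 0 ∨ t = 1 then 1 else 0) (if t = 1 ∨ t = 2 then 1 else 0)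

-- A's epilogue
def finishA (min_days N W : Int) (s : Int × Int × Int × Int × Int × Int) : Int × Int × Int :=
  let (fp_loss, tp_loss, fn_loss, current_fp, current_tp, current_fn) := s
  ((if current_fp ≥ min_days then fp_loss + N * W * current_fp else fp_loss),
   (if current_tp ≥ min_days then tp_loss + N * W * current_tp else tp_loss),
   (if current_fn ≥ min_days then fn_loss + N * W * current_fn else fn_loss))

-- reference semantics: losses contributed from a point where the current run has tag h, length k
def gRef (N W min_days : Int) (h k : Int) : List Int → Int × Int × Int
  | [] => if min_days ≤ k then unit3 h (N * W * k) else (0, 0, 0)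
  | t :: rest =>
    if t = h then gRef N W min_days h (k + 1) rest
    else add3 (if min_days ≤ k then unit3 h (N * W * k) else (0, 0, 0)) (gRef N W min_days t 1 rest)

theorem add3_zero_left (x : Int × Int × Int) : add3 (0, 0, 0) x = x := by
  obtain ⟨a, b, c⟩ := x; simp [add3]

theorem add3_zero_right (x : Int × Int × Int) : add3 x (0, 0, 0) = x := by
  obtain ⟨a, b, c⟩ := x; simp [add3]

theorem add3_assoc (x y z : Int × Int × Int) : add3 (add3 x y) z = add3 x (add3 y z) := by
  simp [add3, add_assoc]

theorem stepA_eq_stepT (N W md p o : Int) (s : Int × Int × Int × Int × Int × Int) :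
    stepA N W md s p o = stepT N W md s (tagOf p o) := by
  obtain ⟨a, b, c, x, y, z⟩ := s
  unfold stepA stepT tagOf
  split_ifs <;> simp_all <;> simp [stepA]

set_option maxHeartbeats 1000000 in
theorem stepT_absCnt (N W md h k t a b c : Int) (hk : 0 ≤ k) :
    stepT N W md (mk6 (a, b, c) (absCnt h k)) t =
      if t = h then mk6 (a, b, c) (absCnt h (k + 1))
      else mk6 (add3 (a, b, c) (if md ≤ k then unit3 h (N * W * k) else (0, 0, 0))) (absCnt t 1) := by
  by_cases hth : t = h <;>
    by_cases e0 : h = 0 <;> by_cases e1 : h = 1 <;> by_cases e2 : h = 2 <;>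
    by_cases f0 : t = 0 <;> by_cases f1 : t = 1 <;> by_cases f2 : t = 2 <;>
    simp_all [stepT, stepA, absCnt, mk6, add3, unit3] <;>
    split_ifs <;> simp_all <;> try omega

theorem finishA_absCnt (N W md h k a b c : Int) :
    finishA md N W (mk6 (a, b, c) (absCnt h k)) =
      add3 (a, b, c) (if md ≤ k then unit3 h (N * W * k) else (0, 0, 0)) := by
  by_cases e0 : h = 0 <;> by_cases e1 : h = 1 <;> by_cases e2 : h = 2 <;>
    simp_all [finishA, absCnt, mk6, add3, unit3] <;> split_ifs <;> simp_all

theorem foldA_eq_gRef (N W md : Int) (tags : List Int) :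
    ∀ (h k a b c : Int), 0 ≤ k →
      finishA md N W (tags.foldl (stepT N W md) (mk6 (a, b, c) (absCnt h k))) =
        add3 (a, b, c) (gRef N W md h k tags) := by
  induction tags with
  | nil =>
    intro h k a b c hk
    simpa [gRef] using finishA_absCnt N W md h k a b c
  | cons t rest ih =>
    intro h k a b c hk
    rw [List.foldl_cons, stepT_absCnt N W md h k t a b c hk]
    by_cases hth : t = h
    · rw [if_pos hth, ih h (k + 1) a b c (by omega)]
      simp [gRef, hth]
    · rw [if_neg hth]
      rcases hL : add3 (a, b, c) (if md ≤ k then unit3 h (N * W * k) else (0, 0, 0)) with ⟨a', b', c'⟩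
      conv_rhs => rw [gRef.eq_def]
      simp only [if_neg hth]
      rw [← add3_assoc, hL, ih t 1 a' b' c' (by omega)]

theorem gRef_eq_runScan (N W md : Int) (tags : List Int) :
    ∀ (h k : Int),
      gRef N W md h k tags =
        add3 (if md ≤ k + (runLen h tags : Int) then unit3 h (N * W * (k + (runLen h tags : Int))) else (0, 0, 0))
          (runScan N W md (tags.drop (runLen h tags))) := by
  induction tags with
  | nil => intro h k; simp [gRef, runLen, runScan, add3_zero_right]
  | cons t rest ih =>
    intro h k
    by_cases hth : t = h
    · subst hth
      simp only [gRef, runLen, beq_self_eq_true, if_true, List.drop_succ_cons]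
      rw [ih t (k + 1)]
      have e : k + 1 + (runLen t rest : Int) = k + ((runLen t rest : Int) + 1) := by ring
      push_cast
      rw [e]
    · have hr : runLen h (t :: rest) = 0 := by simp [runLen, hth]
      rw [hr, gRef.eq_def]
      simp only [if_neg hth, List.drop_zero, Nat.cast_zero, add_zero]
      congr 1
      rw [ih t 1, runScan]
      rcases hrs : runScan N W md (rest.drop (runLen t rest)) with ⟨u, v, w⟩
      by_cases t0 : t = 0 <;> by_cases t1 : t = 1 <;> by_cases t2 : t = 2 <;>
        simp_all [unit3, add3] <;> split_ifs <;> simp_all <;> try omega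

theorem runScan_eq_gRef (N W md : Int) (tags : List Int) :
    runScan N W md tags = gRef N W md 3 0 tags := by
  cases tags with
  | nil => simp [runScan, gRef, unit3]
  | cons t rest =>
    rw [runScan]
    simp only [gRef]
    by_cases ht3 : t = 3
    · subst ht3
      rw [if_pos rfl, show (0 : Int) + 1 = 1 by norm_num, gRef_eq_runScan N W md rest 3 1]
      rcases hrs : runScan N W md (rest.drop (runLen 3 rest)) with ⟨u, v, w⟩
      simp [unit3, add3]
    · rw [if_neg ht3, gRef_eq_runScan N W md rest t 1]
      rcases hrs : runScan N W md (rest.drop (runLen t rest)) with ⟨u, v, w⟩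
      by_cases t0 : t = 0 <;> by_cases t1 : t = 1 <;> by_cases t2 : t = 2 <;>
        simp_all [unit3, add3] <;> split_ifs <;> simp_all <;> try omega

theorem fold_two {S : Type} (f : S → Int → Int → S) :
    ∀ (pred obs : List Int), pred.length ≤ obs.length → ∀ (s : S),
      (List.range pred.length).foldl (fun s k => f s (pred.getD k 0) (obs.getD k 0)) s =
        (pred.zip obs).foldl (fun s po => f s po.1 po.2) s := by
  intro pred
  induction pred with
  | nil => intro obs h s; simp
  | cons p pred ih =>
    intro obs h s
    cases obs with
    | nil => simp at h
    | cons o obs =>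
      rw [List.length_cons, List.range_succ_eq_map]
      simp only [List.foldl_cons, List.foldl_map, List.getD_cons_zero, List.getD_cons_succ,
        List.zip_cons_cons]
      exact ih obs (by simpa using h) _

theorem map_two {S : Type} (g : Int → Int → S) :
    ∀ (pred obs : List Int), pred.length ≤ obs.length →
      (List.range pred.length).map (fun k => g (pred.getD k 0) (obs.getD k 0)) =
        (pred.zip obs).map (fun po => g po.1 po.2) := by
  intro pred
  induction pred with
  | nil => intro obs h; simp
  | cons p pred ih =>
    intro obs h
    cases obs with
    | nil => simp at h
    | cons o obs =>
      rw [List.length_cons, List.range_succ_eq_map]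
      simp only [List.map_cons, List.map_map, List.getD_cons_zero, List.getD_cons_succ,
        List.zip_cons_cons, Function.comp_def]
      rw [ih obs (by simpa using h)]

-- ===== VERDICT (by name: the statement is the Claim_ definition above) =====
theorem calculate_cm_costs_spec : Claim_equal_calculate_cm_costs := by
  intro pred obs N W md _ hpre
  have hlen : pred.length ≤ obs.length := hpre
  show calculate_cm_costs pred obs N W md = calculate_cm_costs_alt pred obs N W md
  have hA : calculate_cm_costs pred obs N W md =
      finishA md N W ((PySem.List.pyRange 0 (pred.length : Int) 1).foldl
        (fun s i => stepA N W md s (PySem.List.pyGetD pred i 0) (PySem.List.pyGetD obs i 0))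
        (0, 0, 0, 0, 0, 0)) := rfl
  have hrange : PySem.List.pyRange 0 (pred.length : Int) 1 =
      (List.range pred.length).map (fun k : Nat => (k : Int)) :=
    PySem.List.pyRange_zero_nat pred.length
  rw [hA, hrange, List.foldl_map]
  simp only [PySem.List.pyGetD_natCast]
  rw [fold_two (stepA N W md) pred obs hlen]
  have hstep : (fun (s : Int × Int × Int × Int × Int × Int) (po : Int × Int) => stepA N W md s po.1 po.2)
      = fun s po => stepT N W md s (tagOf po.1 po.2) := by
    funext s po; exact stepA_eq_stepT N W md po.1 po.2 s
  rw [hstep]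
  have hmap : (pred.zip obs).foldl (fun s po => stepT N W md s (tagOf po.1 po.2)) (0, 0, 0, 0, 0, 0)
      = ((pred.zip obs).map (fun po => tagOf po.1 po.2)).foldl (stepT N W md) (0, 0, 0, 0, 0, 0) := by
    rw [List.foldl_map]
  rw [hmap]
  have hinit : ((0, 0, 0, 0, 0, 0) : Int × Int × Int × Int × Int × Int) = mk6 (0, 0, 0) (absCnt 3 0) := by
    norm_num [mk6, absCnt]
  rw [hinit, foldA_eq_gRef N W md _ 3 0 0 0 0 le_rfl, add3_zero_left]
  have hB : calculate_cm_costs_alt pred obs N W md =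
      runScan N W md ((pred.zip obs).map (fun po => tagOf po.1 po.2)) := by
    unfold calculate_cm_costs_alt
    rw [hrange, List.map_map]
    simp only [Function.comp_def, PySem.List.pyGetD_natCast]
    rw [map_two (fun p o => tagOf p o) pred obs hlen]
  rw [hB, runScan_eq_gRef]
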